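-- pv_equiv track=rewrite | github.com/gwerneckp/NSI-Epreuve-Pratique-2024 | sujets/sujet_28/sujet_answer_28.py | eleves_du_mois
-- ===== SOURCE A (Python) =====
-- def eleves_du_mois(eleves: list[str], notes: list[int]) -> tuple[int, list[str]]:
--     note_maxi = 0
--     meilleurs_eleves: list[str] = []
--
--     for i in range(len(eleves)):
--         if notes[i] == note_maxi:
--             meilleurs_eleves.append(eleves[i])
--         elif notes[i] > note_maxi:
--             note_maxi = notes[i]
--             meilleurs_eleves = [eleves[i]]
--
--     return (note_maxi, meilleurs_eleves)
-- ===== SOURCE B (Python) =====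
-- def eleves_du_mois(eleves: list[str], notes: list[int]) -> tuple[int, list[str]]:
--     n = len(eleves)
--     note_maxi = 0
--     for i in range(n):
--         if notes[i] > note_maxi:
--             note_maxi = notes[i]
--     meilleurs_eleves = [eleves[i] for i in range(n) if notes[i] == note_maxi]
--     return (note_maxi, meilleurs_eleves)
-- ===== Notes on version B (the rewrite author's own statement) =====
-- stated objective: simpler
-- what changed: A's single pass that carries and rebuilds the winners list alongside the running max is split into two plain passes: a running-max loop, then a comprehension collecting the students whose note equals the max.
import Mathlib
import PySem

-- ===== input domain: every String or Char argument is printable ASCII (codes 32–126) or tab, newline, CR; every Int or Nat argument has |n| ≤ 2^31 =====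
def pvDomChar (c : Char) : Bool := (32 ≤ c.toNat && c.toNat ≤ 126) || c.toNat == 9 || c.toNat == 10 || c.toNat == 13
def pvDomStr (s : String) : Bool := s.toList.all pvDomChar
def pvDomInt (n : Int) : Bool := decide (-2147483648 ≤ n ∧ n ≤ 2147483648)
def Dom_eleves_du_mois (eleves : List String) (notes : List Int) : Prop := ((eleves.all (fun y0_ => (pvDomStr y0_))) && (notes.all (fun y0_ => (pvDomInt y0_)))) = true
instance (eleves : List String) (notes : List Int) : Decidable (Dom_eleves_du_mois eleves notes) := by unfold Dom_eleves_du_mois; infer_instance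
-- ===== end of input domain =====

-- B replaces A's single pass (running max + rebuilt winners list) by two plain passes:
-- a running-max loop, then a comprehension of the students whose note equals the max (objective: simpler).

-- ===== PORT A =====
-- loop body of A: compare notes[i] with the running max, append / reset the winners list
def pvStepA (eleves : List String) (notes : List Int) (st : Int × List String) (i : Int) : Int × List String :=
  if PySem.List.pyGetD notes i 0 = st.1 then (st.1, st.2 ++ [PySem.List.pyGetD eleves i ""])
  else if PySem.List.pyGetD notes i 0 > st.1 then (PySem.List.pyGetD notes i 0, [PySem.List.pyGetD eleves i ""])
  else st

def eleves_du_mois (eleves : List String) (notes : List Int) : Int × List String :=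
  (PySem.List.pyRange 0 (eleves.length : Int) 1).foldl (pvStepA eleves notes) (0, [])

-- ===== PORT B =====
-- first pass of B: running max starting at 0
def pvMaxStep (notes : List Int) (acc : Int) (i : Int) : Int :=
  if PySem.List.pyGetD notes i 0 > acc then PySem.List.pyGetD notes i 0 else acc

-- second pass of B: collect eleves[i] where notes[i] == note_maxi
def pvCollectStep (eleves : List String) (notes : List Int) (m : Int) (acc : List String) (i : Int) : List String :=
  if PySem.List.pyGetD notes i 0 = m then acc ++ [PySem.List.pyGetD eleves i ""] else acc

def eleves_du_mois_alt (eleves : List String) (notes : List Int) : Int × List String :=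
  let note_maxi := (PySem.List.pyRange 0 (eleves.length : Int) 1).foldl (pvMaxStep notes) 0
  (note_maxi, (PySem.List.pyRange 0 (eleves.length : Int) 1).foldl (pvCollectStep eleves notes note_maxi) [])

-- ===== PRECONDITION & SPEC =====
-- Pre_ excludes inputs with len(notes) < len(eleves): there Python A raises IndexError (so does B).
def Pre_eleves_du_mois (eleves : List String) (notes : List Int) : Prop := eleves.length ≤ notes.length
instance (eleves : List String) (notes : List Int) : Decidable (Pre_eleves_du_mois eleves notes) := by unfold Pre_eleves_du_mois; infer_instance
def pvWitness_eleves_du_mois : List String × List Int := (["alice", "bob", "carol"], [15, 12, 15])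

def Spec_eleves_du_mois (eleves : List String) (notes : List Int) (out : Int × List String) : Prop := out = eleves_du_mois_alt eleves notes
instance (eleves : List String) (notes : List Int) (out : Int × List String) : Decidable (Spec_eleves_du_mois eleves notes out) := by unfold Spec_eleves_du_mois; infer_instance

-- ===== CLAIM (what is proved, stated in full; the proofs are below) =====
def Claim_equal_eleves_du_mois : Prop := ∀ (eleves : List String) (notes : List Int), Dom_eleves_du_mois eleves notes → Pre_eleves_du_mois eleves notes → Spec_eleves_du_mois eleves notes (eleves_du_mois eleves notes)

-- ===== LEMMAS AND PROOFS =====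

-- B's running max over the first k indices
def pvM (notes : List Int) (k : Nat) : Int :=
  (PySem.List.pyRange 0 (k : Int) 1).foldl (pvMaxStep notes) 0

lemma pv_range_succ (k : Nat) :
    PySem.List.pyRange 0 ((k + 1 : Nat) : Int) 1 = PySem.List.pyRange 0 (k : Int) 1 ++ [(k : Int)] := by
  have := PySem.List.pyRange_one_succ_right (a := 0) (b := (k : Int)) (by exact_mod_cast Nat.zero_le k)
  push_cast
  exact this

-- if no note in the prefix equals m, the collect pass leaves the accumulator unchanged
lemma pv_collect_nil (eleves : List String) (notes : List Int) (m : Int) (k : Nat)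
    (h : ∀ j : Nat, j < k → PySem.List.pyGetD notes (j : Int) 0 ≠ m) (acc : List String) :
    (PySem.List.pyRange 0 (k : Int) 1).foldl (pvCollectStep eleves notes m) acc = acc := by
  induction k generalizing acc with
  | zero => simp [PySem.List.pyRange_one_eq_nil]
  | succ n ih =>
    rw [pv_range_succ, List.foldl_append]
    rw [ih (fun j hj => h j (Nat.lt_succ_of_lt hj)) acc]
    simp only [List.foldl_cons, List.foldl_nil, pvCollectStep]
    rw [if_neg (h n (Nat.lt_succ_self n))]

-- main invariant: A's state after k steps is (B's running max, B's collect pass with that max),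
-- and the running max bounds every note of the prefix
lemma pv_main (eleves : List String) (notes : List Int) (k : Nat) :
    (PySem.List.pyRange 0 (k : Int) 1).foldl (pvStepA eleves notes) (0, []) =
      (pvM notes k, (PySem.List.pyRange 0 (k : Int) 1).foldl (pvCollectStep eleves notes (pvM notes k)) [])
    ∧ ∀ j : Nat, j < k → PySem.List.pyGetD notes (j : Int) 0 ≤ pvM notes k := by
  induction k with
  | zero => simp [pvM, PySem.List.pyRange_one_eq_nil]
  | succ n ih =>
    obtain ⟨hstate, hbound⟩ := ih
    have hMsucc : pvM notes (n + 1) = pvMaxStep notes (pvM notes n) (n : Int) := by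
      unfold pvM; rw [pv_range_succ, List.foldl_append]; simp
    rcases lt_trichotomy (PySem.List.pyGetD notes (n : Int) 0) (pvM notes n) with hlt | heq | hgt
    · -- notes[n] < current max: state unchanged, collect skips index n
      have hM : pvM notes (n + 1) = pvM notes n := by
        rw [hMsucc]; unfold pvMaxStep; rw [if_neg (by omega)]
      constructor
      · rw [pv_range_succ, List.foldl_append, List.foldl_append, hstate, hM]
        simp only [List.foldl_cons, List.foldl_nil]
        unfold pvStepA pvCollectStep
        rw [if_neg (by omega), if_neg (by omega), if_neg (by omega)]
      · intro j hj
        rw [hM]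
        rcases Nat.lt_succ_iff_lt_or_eq.mp hj with h | h
        · exact hbound j h
        · subst h; omega
    · -- notes[n] = current max: both append eleves[n]
      have hM : pvM notes (n + 1) = pvM notes n := by
        rw [hMsucc]; unfold pvMaxStep; rw [if_neg (by omega)]
      constructor
      · rw [pv_range_succ, List.foldl_append, List.foldl_append, hstate, hM]
        simp only [List.foldl_cons, List.foldl_nil]
        unfold pvStepA pvCollectStep
        rw [if_pos heq, if_pos heq]
      · intro j hj
        rw [hM]
        rcases Nat.lt_succ_iff_lt_or_eq.mp hj with h | h
        · exact hbound j h
        · subst h; omega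
    · -- notes[n] > current max: A resets; B's collect pass with the new max skips the whole prefix
      have hM : pvM notes (n + 1) = PySem.List.pyGetD notes (n : Int) 0 := by
        rw [hMsucc]; unfold pvMaxStep; rw [if_pos (by omega)]
      constructor
      · rw [pv_range_succ, List.foldl_append, List.foldl_append, hstate, hM]
        rw [pv_collect_nil eleves notes (PySem.List.pyGetD notes (n : Int) 0) n
              (fun j hj => by have := hbound j hj; omega) []]
        simp only [List.foldl_cons, List.foldl_nil]
        unfold pvStepA pvCollectStep
        rw [if_neg (by omega), if_pos (by omega), if_pos rfl]
        simp
      · intro j hj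
        rw [hM]
        rcases Nat.lt_succ_iff_lt_or_eq.mp hj with h | h
        · have := hbound j h; omega
        · subst h; omega

-- ===== VERDICT (by name: the statement is the Claim_ definition above) =====
theorem eleves_du_mois_spec : Claim_equal_eleves_du_mois := by
  intro eleves notes _ _
  unfold Spec_eleves_du_mois eleves_du_mois eleves_du_mois_alt
  exact (pv_main eleves notes eleves.length).1
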